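-- pv_equiv track=rewrite | github.com/Watano-SQ/SICP-of-NJU | hw01-Code/hw01.py | remove_even_position
-- ===== SOURCE A (Python) =====
-- def remove_even_position(n):
--     """Removes the digits of n in even positions (the 2nd, 4th, 6th, … from left to right),
--     and returns the number formed by the remaining digits.
--
--     >>> remove_even_position(0)
--     0
--     >>> remove_even_position(10)
--     1
--     >>> remove_even_position(123)
--     13
--     >>> remove_even_position(123456)
--     135
--     """
--     "*** YOUR CODE HERE ***"
--     def digit_count(n):
--         count = 0
--         while n > 0:
--             n = n // 10
--             count = count + 1
--         return count
--
--     digits = digit_count(n)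
--     result = 0
--     count = 0
--     power = 0
--
--     while n > 0:
--         if digits % 2 == 0:
--             mod = n % 10
--             n = n // 10
--             count = count + 1
--             if count % 2 == 0:
--                 result = mod * (10 ** power) + result
--                 power = power +1
--         elif digits % 2 != 0:
--             mod = n % 10
--             n = n // 10
--             count = count + 1
--             if count % 2 != 0:
--                 result = mod * (10 ** power) + result
--                 power = power +1
--
--     return result
-- ===== SOURCE B (Python) =====
-- def remove_even_position(n):
--     digits = []
--     while n > 0:
--         digits.append(n % 10)
--         n //= 10
--     digits.reverse()
--     result = 0
--     keep = True
--     for d in digits: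
--         if keep:
--             result = result * 10 + d
--         keep = not keep
--     return result
-- ===== Notes on version B (the rewrite author's own statement) =====
-- stated objective: simpler
-- what changed: B collects the digits into a list and folds over them most-significant-first with a Horner accumulator and a keep/skip toggle, instead of A's digit-count parity bookkeeping with count and 10**power accumulation from the right.
import Mathlib
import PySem

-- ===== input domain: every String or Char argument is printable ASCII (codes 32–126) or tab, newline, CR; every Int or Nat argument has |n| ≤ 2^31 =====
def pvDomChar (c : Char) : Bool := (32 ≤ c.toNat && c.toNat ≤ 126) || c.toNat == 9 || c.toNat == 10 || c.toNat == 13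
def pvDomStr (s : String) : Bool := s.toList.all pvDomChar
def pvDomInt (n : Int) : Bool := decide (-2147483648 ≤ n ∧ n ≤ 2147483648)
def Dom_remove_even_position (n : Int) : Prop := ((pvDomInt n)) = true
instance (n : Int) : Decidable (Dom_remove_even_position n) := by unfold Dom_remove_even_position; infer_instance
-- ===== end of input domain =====

-- B replaces A's digit-count parity bookkeeping (count, 10**power accumulation from the right)
-- by a digit list folded most-significant-first with a Horner accumulator and a keep/skip toggle (objective: simpler).

-- ===== PORT A =====
-- termination helper for the while-loops (n strictly shrinks under // 10)
theorem pvShrink (n : Int) (h : 0 < n) : (PySem.Int.floordiv n 10).toNat < n.toNat := by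
  rw [PySem.Int.floordiv_eq_ediv_of_pos (by omega)]
  omega

-- inner helper digit_count of A
def pvDigitCount (n count : Int) : Int :=
  if 0 < n then pvDigitCount (PySem.Int.floordiv n 10) (count + 1) else count
termination_by n.toNat
decreasing_by exact pvShrink n (by assumption)

-- A's while-loop; `digits` is fixed, state is (n, result, count, power)
def pvALoop (digits n result count power : Int) : Int :=
  if 0 < n then
    if PySem.Int.mod digits 2 = 0 then
      let m := PySem.Int.mod n 10
      let n' := PySem.Int.floordiv n 10
      let count' := count + 1
      if PySem.Int.mod count' 2 = 0 then
        pvALoop digits n' (m * 10 ^ power.toNat + result) count' (power + 1)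
      else
        pvALoop digits n' result count' power
    else
      let m := PySem.Int.mod n 10
      let n' := PySem.Int.floordiv n 10
      let count' := count + 1
      if PySem.Int.mod count' 2 ≠ 0 then
        pvALoop digits n' (m * 10 ^ power.toNat + result) count' (power + 1)
      else
        pvALoop digits n' result count' power
  else result
termination_by n.toNat
decreasing_by all_goals exact pvShrink n (by assumption)

def remove_even_position (n : Int) : Int :=
  let digits := pvDigitCount n 0
  pvALoop digits n 0 0 0

-- ===== PORT B =====
-- B's first while-loop: digits of n, least-significant first
def pvDigitsLoop (n : Int) (digits : List Int) : List Int :=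
  if 0 < n then pvDigitsLoop (PySem.Int.floordiv n 10) (digits ++ [PySem.Int.mod n 10]) else digits
termination_by n.toNat
decreasing_by exact pvShrink n (by assumption)

-- B's for-loop: Horner fold with a keep/skip toggle
def pvBStep (st : Int × Bool) (d : Int) : Int × Bool :=
  if st.2 then (st.1 * 10 + d, !st.2) else (st.1, !st.2)

def remove_even_position_alt (n : Int) : Int :=
  let digits := (pvDigitsLoop n []).reverse
  (digits.foldl pvBStep (0, true)).1

-- ===== PRECONDITION & SPEC =====
def Spec_remove_even_position (n : Int) (out : Int) : Prop := out = remove_even_position_alt n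
instance (n : Int) (out : Int) : Decidable (Spec_remove_even_position n out) := by unfold Spec_remove_even_position; infer_instance

-- ===== CLAIM (what is proved, stated in full; the proofs are below) =====
def Claim_equal_remove_even_position : Prop := ∀ (n : Int), Dom_remove_even_position n → Spec_remove_even_position n (remove_even_position n)

-- ===== LEMMAS AND PROOFS =====

-- value of a least-significant-first digit list
def pvVal : List Int → Int
  | [] => 0
  | d :: l => d + 10 * pvVal l

-- keep every other element, starting with the first iff b
def pvKeep (b : Bool) : List Int → List Int
  | [] => []
  | d :: l => if b then d :: pvKeep false l else pvKeep true l

-- Horner fold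
def pvHorner (r : Int) : List Int → Int
  | [] => r
  | d :: l => pvHorner (r * 10 + d) l

-- flag of the toggle after consuming a list of given length
def pvFlag (b : Bool) (m : Nat) : Bool := if m % 2 = 0 then b else !b

def pvL (n : Int) : List Int := pvDigitsLoop n []

lemma pvL_nil (n : Int) (h : ¬ 0 < n) : pvL n = [] := by
  unfold pvL; rw [pvDigitsLoop]; simp [h]

lemma pvDigitsLoop_acc (N : Nat) : ∀ (n : Int) (acc : List Int), n.toNat ≤ N →
    pvDigitsLoop n acc = acc ++ pvL n := by
  induction N with
  | zero =>
    intro n acc h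
    have hn : ¬ 0 < n := by omega
    rw [pvDigitsLoop, pvL_nil n hn]; simp [hn]
  | succ N ih =>
    intro n acc h
    by_cases hn : 0 < n
    · have hlt := pvShrink n hn
      rw [pvDigitsLoop]; simp only [hn, if_true]
      rw [ih _ _ (by omega)]
      have hstep : pvL n = [PySem.Int.mod n 10] ++ pvL (PySem.Int.floordiv n 10) := by
        show pvDigitsLoop n [] = _
        rw [pvDigitsLoop]; simp only [hn, if_true, List.nil_append]
        exact ih _ _ (by omega)
      rw [hstep, List.append_assoc]
    · rw [pvDigitsLoop, pvL_nil n hn]; simp [hn]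

lemma pvL_cons (n : Int) (hn : 0 < n) :
    pvL n = PySem.Int.mod n 10 :: pvL (PySem.Int.floordiv n 10) := by
  show pvDigitsLoop n [] = _
  rw [pvDigitsLoop]; simp only [hn, if_true, List.nil_append]
  exact pvDigitsLoop_acc (PySem.Int.floordiv n 10).toNat _ _ (le_refl _)

lemma pvDigitCount_eq (N : Nat) : ∀ (n c : Int), n.toNat ≤ N →
    pvDigitCount n c = c + ((pvL n).length : Int) := by
  induction N with
  | zero =>
    intro n c h
    have hn : ¬ 0 < n := by omega
    rw [pvDigitCount, pvL_nil n hn]; simp [hn]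
  | succ N ih =>
    intro n c h
    by_cases hn : 0 < n
    · have hlt := pvShrink n hn
      rw [pvDigitCount]; simp only [hn, if_true]
      rw [ih _ _ (by omega), pvL_cons n hn]
      simp; ring
    · rw [pvDigitCount, pvL_nil n hn]; simp [hn]

lemma pvVal_append (u : List Int) (x : Int) :
    pvVal (u ++ [x]) = pvVal u + x * 10 ^ u.length := by
  induction u with
  | nil => simp [pvVal]
  | cons d t ih => simp [pvVal, ih]; ring

lemma pvHorner_eq (l : List Int) : ∀ r : Int,
    pvHorner r l = r * 10 ^ l.length + pvVal l.reverse := by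
  induction l with
  | nil => intro r; simp [pvHorner, pvVal]
  | cons d t ih =>
    intro r
    rw [pvHorner, ih, List.reverse_cons, pvVal_append]
    simp [pow_succ]; ring

lemma pvKeep_append (l : List Int) : ∀ (b : Bool) (x : Int),
    pvKeep b (l ++ [x]) = pvKeep b l ++ pvKeep (pvFlag b l.length) [x] := by
  induction l with
  | nil => intro b x; simp [pvKeep, pvFlag]
  | cons d t ih =>
    intro b x
    have hf : ∀ b' : Bool, pvFlag b' (t.length + 1) = pvFlag (!b') t.length := by
      intro b'
      simp only [pvFlag]
      rcases Nat.even_or_odd t.length with he | ho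
      · have h1 : t.length % 2 = 0 := Nat.even_iff.mp he
        have h2 : (t.length + 1) % 2 = 1 := by omega
        simp [h1, h2]
      · have h1 : t.length % 2 = 1 := Nat.odd_iff.mp ho
        have h2 : (t.length + 1) % 2 = 0 := by omega
        simp [h1, h2]
    cases b <;> simp [pvKeep, ih, hf]

lemma pvKeep_reverse (l : List Int) :
    pvKeep true l.reverse = (pvKeep (decide (l.length % 2 = 1)) l).reverse := by
  induction l with
  | nil => simp [pvKeep]
  | cons d t ih =>
    rw [List.reverse_cons, pvKeep_append, ih]
    rcases Nat.even_or_odd t.length with he | ho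
    · have h1 : t.length % 2 = 0 := Nat.even_iff.mp he
      have h2 : (t.length + 1) % 2 = 1 := by omega
      have hrl : t.reverse.length = t.length := List.length_reverse
      simp [pvFlag, h1, h2, hrl, pvKeep]
    · have h1 : t.length % 2 = 1 := Nat.odd_iff.mp ho
      have h2 : (t.length + 1) % 2 = 0 := by omega
      have hrl : t.reverse.length = t.length := List.length_reverse
      simp [pvFlag, h1, h2, hrl, pvKeep]

lemma pvFold_eq (l : List Int) : ∀ (r : Int) (b : Bool),
    (l.foldl pvBStep (r, b)).1 = pvHorner r (pvKeep b l) := by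
  induction l with
  | nil => intro r b; simp [pvHorner, pvKeep]
  | cons d t ih =>
    intro r b
    cases b <;> simp [List.foldl_cons, pvBStep, ih, pvKeep, pvHorner]

lemma pvMod2 (x : Int) : PySem.Int.mod x 2 = x % 2 :=
  PySem.Int.mod_eq_emod_of_pos (by omega)

lemma pvALoop_eq (N : Nat) : ∀ (k n r c p : Int), n.toNat ≤ N → 0 ≤ p →
    pvALoop k n r c p =
      10 ^ p.toNat * pvVal (pvKeep (decide ((c + 1) % 2 = k % 2)) (pvL n)) + r := by
  induction N with
  | zero =>
    intro k n r c p h hp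
    have hn : ¬ 0 < n := by omega
    rw [pvALoop, pvL_nil n hn]; simp [hn, pvKeep, pvVal]
  | succ N ih =>
    intro k n r c p h hp
    by_cases hn : 0 < n
    · have hlt := pvShrink n hn
      have hL := pvL_cons n hn
      have hptn : (p + 1).toNat = p.toNat + 1 := by omega
      rw [pvALoop, if_pos hn]
      simp only [pvMod2]
      split_ifs with h1 h2 h2
      · -- k even, (c+1) even : kept
        rw [ih _ _ _ _ _ (by omega) (by omega), hL]
        have hb1 : decide ((c + 1) % 2 = k % 2) = true := by
          simp only [decide_eq_true_eq]; omega
        have hb2 : decide ((c + 1 + 1) % 2 = k % 2) = false := by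
          simp only [decide_eq_false_iff_not]; omega
        rw [hb1, hb2]
        simp only [pvKeep, if_true, pvVal, hptn, pow_succ]
        ring
      · -- k even, (c+1) odd : skipped
        rw [ih _ _ _ _ _ (by omega) hp, hL]
        have hb1 : decide ((c + 1) % 2 = k % 2) = false := by
          simp only [decide_eq_false_iff_not]; omega
        have hb2 : decide ((c + 1 + 1) % 2 = k % 2) = true := by
          simp only [decide_eq_true_eq]; omega
        rw [hb1, hb2]
        simp [pvKeep]
      · -- k odd, (c+1) odd : kept
        rw [ih _ _ _ _ _ (by omega) (by omega), hL]
        have hk1 : k % 2 = 1 := by omega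
        have hb1 : decide ((c + 1) % 2 = k % 2) = true := by
          simp only [decide_eq_true_eq]; omega
        have hb2 : decide ((c + 1 + 1) % 2 = k % 2) = false := by
          simp only [decide_eq_false_iff_not]; omega
        rw [hb1, hb2]
        simp only [pvKeep, if_true, pvVal, hptn, pow_succ]
        ring
      · -- k odd, (c+1) even : skipped
        rw [ih _ _ _ _ _ (by omega) hp, hL]
        have hk1 : k % 2 = 1 := by omega
        have hb1 : decide ((c + 1) % 2 = k % 2) = false := by
          simp only [decide_eq_false_iff_not]; omega
        have hb2 : decide ((c + 1 + 1) % 2 = k % 2) = true := by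
          simp only [decide_eq_true_eq]; omega
        rw [hb1, hb2]
        simp [pvKeep]
    · rw [pvALoop, pvL_nil n hn]; simp [hn, pvKeep, pvVal]

-- ===== VERDICT (by name: the statement is the Claim_ definition above) =====
theorem remove_even_position_spec : Claim_equal_remove_even_position := by
  intro n _
  unfold Spec_remove_even_position remove_even_position remove_even_position_alt
  have hk : pvDigitCount n 0 = ((pvL n).length : Int) := by
    rw [pvDigitCount_eq n.toNat n 0 (le_refl _)]; simp
  rw [hk, pvALoop_eq n.toNat _ n 0 0 0 (le_refl _) (le_refl _)]
  rw [pvFold_eq]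
  show _ = pvHorner 0 (pvKeep true (pvL n).reverse)
  rw [pvKeep_reverse, pvHorner_eq]
  have hb : decide (((0:Int) + 1) % 2 = ((pvL n).length : Int) % 2)
      = decide ((pvL n).length % 2 = 1) := by
    rw [decide_eq_decide]; omega
  rw [hb]
  simp
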